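-- pv_equiv track=rewrite | github.com/Arsen1302/Code-copy-detector | TestData/solutions/problem_1209_5.py | solution_1209_5
-- ===== SOURCE A (Python) =====
-- from typing import List
--
-- def solution_1209_5(x: int, y: int, points: List[List[int]]) -> int:
--     ind = -1
--     man = -1
--     for i in points:
--         if i[0] == x or i[1] == y:
--             if man == -1 or (abs(i[0] - x) + abs(i[1] - y)) < man:
--                 man = abs(i[0] - x) + abs(i[1] - y)
--                 ind = points.index(i)
--     return ind
-- ===== SOURCE B (Python) =====
-- from typing import List
--
-- def solution_1209_5(x: int, y: int, points: List[List[int]]) -> int: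
--     def onaxis(p):
--         return p[0] == x or p[1] == y
--     def dist(p):
--         return abs(p[0] - x) + abs(p[1] - y)
--     if not any(onaxis(p) for p in points):
--         return -1
--     d = min(dist(p) for p in points if onaxis(p))
--     return next(i for i, p in enumerate(points) if onaxis(p) and dist(p) == d)
-- ===== Notes on version B (the rewrite author's own statement) =====
-- stated objective: alternative
-- what changed: A threads a running (man, ind) state through one loop and re-scans the list with points.index on every update; B is staged: an any() pass for the empty case, a min() reduction over the axis-aligned distances alone, then a search for the first index achieving that minimal distance, which reproduces A's strict-< first-occurrence rule (also under duplicate points, where A's .index re-scan returns the first duplicate's index).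
import Mathlib
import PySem

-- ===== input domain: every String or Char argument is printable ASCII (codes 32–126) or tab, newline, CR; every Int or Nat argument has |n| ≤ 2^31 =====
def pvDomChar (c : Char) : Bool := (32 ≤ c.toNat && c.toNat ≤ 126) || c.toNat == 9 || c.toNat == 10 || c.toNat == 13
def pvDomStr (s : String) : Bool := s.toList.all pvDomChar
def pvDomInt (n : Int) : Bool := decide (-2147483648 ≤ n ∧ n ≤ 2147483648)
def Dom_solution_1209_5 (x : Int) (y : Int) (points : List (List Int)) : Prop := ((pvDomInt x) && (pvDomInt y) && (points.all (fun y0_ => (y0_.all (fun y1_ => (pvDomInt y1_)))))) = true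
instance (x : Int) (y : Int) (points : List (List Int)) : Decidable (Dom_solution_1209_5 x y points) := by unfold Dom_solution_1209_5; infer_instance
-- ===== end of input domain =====

-- B replaces A's state-threading scan (with its points.index re-scan on every update) by
-- staged passes: min() over the axis-aligned distances, then the first index achieving it.


-- ===== PORT A =====
-- i[0] / i[1] are ported as PySem.List.pyGetD with default 0; Pre_ restricts to points of
-- length ≥ 2, exactly where Python's i[0]/i[1] do not raise IndexError, so the default is
-- never what the result depends on.  points.index(i) is PySem.List.index?; the none branch
-- is unreachable (i ∈ points).
def solution_1209_5 (x : Int) (y : Int) (points : List (List Int)) : Int :=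
  (points.foldl
    (fun (s : Int × Int) i =>
      if PySem.List.pyGetD i 0 0 = x ∨ PySem.List.pyGetD i 1 0 = y then
        if s.2 = -1 ∨ |PySem.List.pyGetD i 0 0 - x| + |PySem.List.pyGetD i 1 0 - y| < s.2 then
          ((match PySem.List.index? points i with
            | some k => (k : Int)
            | none => -1),
           |PySem.List.pyGetD i 0 0 - x| + |PySem.List.pyGetD i 1 0 - y|)
        else s
      else s)
    ((-1 : Int), (-1 : Int))).1

-- ===== PORT B =====
-- Source B's local helpers onaxis / dist:
def pvOnAxis (x : Int) (y : Int) (p : List Int) : Bool :=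
  decide (PySem.List.pyGetD p 0 0 = x ∨ PySem.List.pyGetD p 1 0 = y)
def pvDist (x : Int) (y : Int) (p : List Int) : Int :=
  |PySem.List.pyGetD p 0 0 - x| + |PySem.List.pyGetD p 1 0 - y|
-- any() is List.any; min(generator) is PySem.List.min? with identity key over the filtered,
-- mapped distance list; next(… for i, p in enumerate(points) …) is find? over
-- PySem.List.enumerate.  The two 'none' fallbacks are unreachable (guarded by any()).
def solution_1209_5_alt (x : Int) (y : Int) (points : List (List Int)) : Int :=
  if points.any (pvOnAxis x y) = false then -1
  else
    match PySem.List.min? ((points.filter (pvOnAxis x y)).map (pvDist x y)) (fun v => v) with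
    | none => -1
    | some d =>
      match (PySem.List.enumerate points 0).find?
          (fun ip => pvOnAxis x y ip.2 && (pvDist x y ip.2 == d)) with
      | some ip => ip.1
      | none => -1

-- ===== PRECONDITION & SPEC =====
-- Pre_ excludes exactly the inputs on which Python A raises IndexError: a point with
-- fewer than two coordinates (i[0] or i[1] out of range).
def Pre_solution_1209_5 (x : Int) (y : Int) (points : List (List Int)) : Prop :=
  ∀ p ∈ points, 2 ≤ p.length
instance (x : Int) (y : Int) (points : List (List Int)) : Decidable (Pre_solution_1209_5 x y points) := by unfold Pre_solution_1209_5; infer_instance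
def pvWitness_solution_1209_5 : Int × Int × List (List Int) := (0, 1, [[0, 5], [2, 1], [3, 3]])
def Spec_solution_1209_5 (x : Int) (y : Int) (points : List (List Int)) (out : Int) : Prop := out = solution_1209_5_alt x y points
instance (x : Int) (y : Int) (points : List (List Int)) (out : Int) : Decidable (Spec_solution_1209_5 x y points out) := by unfold Spec_solution_1209_5; infer_instance

-- ===== CLAIM (what is proved, stated in full; the proofs are below) =====
def Claim_equal_solution_1209_5 : Prop := ∀ (x : Int) (y : Int) (points : List (List Int)), Dom_solution_1209_5 x y points → Pre_solution_1209_5 x y points → Spec_solution_1209_5 x y points (solution_1209_5 x y points)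

-- ===== LEMMAS AND PROOFS =====

-- A's loop body, with the list searched by points.index made a parameter.
def pvStep (x y : Int) (pts : List (List Int)) (s : Int × Int) (i : List Int) : Int × Int :=
  if PySem.List.pyGetD i 0 0 = x ∨ PySem.List.pyGetD i 1 0 = y then
    if s.2 = -1 ∨ |PySem.List.pyGetD i 0 0 - x| + |PySem.List.pyGetD i 1 0 - y| < s.2 then
      ((match PySem.List.index? pts i with
        | some k => (k : Int)
        | none => -1),
       |PySem.List.pyGetD i 0 0 - x| + |PySem.List.pyGetD i 1 0 - y|)
    else s
  else s

-- the (distance, index) candidate table, with an arbitrary start index.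
def pvCands (x y : Int) (l : List (List Int)) (s : Int) : List (Int × Int) :=
  (PySem.List.enumerate l s).filterMap
    (fun ip =>
      if PySem.List.pyGetD ip.2 0 0 = x ∨ PySem.List.pyGetD ip.2 1 0 = y
      then some (|PySem.List.pyGetD ip.2 0 0 - x| + |PySem.List.pyGetD ip.2 1 0 - y|, ip.1)
      else none)

lemma solution_1209_5_eq_foldl (x y : Int) (points : List (List Int)) :
    solution_1209_5 x y points = (points.foldl (pvStep x y points) ((-1 : Int), (-1 : Int))).1 := rfl

lemma pvCands_nil (x y s : Int) : pvCands x y [] s = [] := rfl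

lemma pvCands_cons (x y : Int) (p : List Int) (l : List (List Int)) (s : Int) :
    pvCands x y (p :: l) s =
      (if PySem.List.pyGetD p 0 0 = x ∨ PySem.List.pyGetD p 1 0 = y
       then [(|PySem.List.pyGetD p 0 0 - x| + |PySem.List.pyGetD p 1 0 - y|, s)] else [])
      ++ pvCands x y l (s + 1) := by
  simp only [pvCands, PySem.List.enumerate_cons, List.filterMap_cons]
  split_ifs <;> simp

lemma pvCands_append_one (x y : Int) (l : List (List Int)) (p : List Int) (s : Int) :
    pvCands x y (l ++ [p]) s =
      pvCands x y l s ++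
      (if PySem.List.pyGetD p 0 0 = x ∨ PySem.List.pyGetD p 1 0 = y
       then [(|PySem.List.pyGetD p 0 0 - x| + |PySem.List.pyGetD p 1 0 - y|, s + l.length)] else []) := by
  induction l generalizing s with
  | nil => simp [pvCands_cons, pvCands_nil]
  | cons q t ih =>
      rw [List.cons_append, pvCands_cons, pvCands_cons, ih, List.append_assoc]
      have : s + 1 + (t.length : Int) = s + ((q :: t).length : Int) := by
        simp; ring
      rw [this]

lemma pvCands_mem_of_mem (x y : Int) (l : List (List Int)) (s : Int) (p : List Int)
    (hp : p ∈ l) (hc : PySem.List.pyGetD p 0 0 = x ∨ PySem.List.pyGetD p 1 0 = y) :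
    ∃ j, (|PySem.List.pyGetD p 0 0 - x| + |PySem.List.pyGetD p 1 0 - y|, j) ∈ pvCands x y l s := by
  induction l generalizing s with
  | nil => cases hp
  | cons q t ih =>
      rw [pvCands_cons]
      rcases List.mem_cons.mp hp with h | h
      · subst h
        exact ⟨s, by simp [hc]⟩
      · obtain ⟨j, hj⟩ := ih (s + 1) h
        exact ⟨j, List.mem_append.mpr (Or.inr hj)⟩

lemma pvCands_bounds (x y : Int) (l : List (List Int)) (s : Int) :
    ∀ c ∈ pvCands x y l s, 0 ≤ c.1 ∧ s ≤ c.2 ∧ c.2 < s + l.length := by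
  induction l generalizing s with
  | nil => simp [pvCands_nil]
  | cons q t ih =>
      intro c hc
      rw [pvCands_cons] at hc
      rcases List.mem_append.mp hc with h | h
      · split_ifs at h with hq
        · simp only [List.mem_singleton] at h
          subst h
          refine ⟨by positivity, le_refl _, ?_⟩
          simp
        · cases h
      · obtain ⟨h1, h2, h3⟩ := ih (s + 1) c h
        refine ⟨h1, by omega, ?_⟩
        simp only [List.length_cons] at *
        push_cast at h3 ⊢
        omega

lemma min2?_append_one (cs : List (Int × Int)) (e : Int × Int) :
    PySem.List.min2? (cs ++ [e]) Prod.fst Prod.snd =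
      match PySem.List.min2? cs Prod.fst Prod.snd with
      | none => some e
      | some m => if e.1 < m.1 ∨ (e.1 ≤ m.1 ∧ e.2 < m.2) then some e else some m := by
  have key : PySem.List.min2? (cs ++ [e]) Prod.fst Prod.snd =
      (match PySem.List.min2? cs Prod.fst Prod.snd with
       | none => some e
       | some m =>
          if (decide (e.1 < m.1) || !decide (m.1 < e.1) && decide (e.2 < m.2)) = true
          then some e else some m) := by
    unfold PySem.List.min2?
    rw [List.foldl_append, List.foldl_cons, List.foldl_nil]
    split
    · next heq => rw [heq]
    · next m heq => rw [heq]
  rw [key]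
  cases PySem.List.min2? cs Prod.fst Prod.snd with
  | none => rfl
  | some m =>
      dsimp only
      have hiff : ((decide (e.1 < m.1) || !decide (m.1 < e.1) && decide (e.2 < m.2)) = true)
          ↔ (e.1 < m.1 ∨ (e.1 ≤ m.1 ∧ e.2 < m.2)) := by
        simp only [Bool.or_eq_true, Bool.and_eq_true, Bool.not_eq_true', decide_eq_true_eq,
          decide_eq_false_iff_not]
        omega
      exact if_congr hiff rfl rfl

lemma min2?_none_iff (cs : List (Int × Int)) :
    PySem.List.min2? cs Prod.fst Prod.snd = none ↔ cs = [] := by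
  induction cs using List.reverseRecOn with
  | nil => simp [PySem.List.min2?]
  | append_singleton cs e ih =>
      rw [min2?_append_one]
      cases PySem.List.min2? cs Prod.fst Prod.snd with
      | none => simp
      | some m =>
          dsimp only
          split_ifs <;> simp

-- the lexicographic minimum, with first-occurrence tie-break on the first component
lemma min2?_some_spec (cs : List (Int × Int)) (m : Int × Int)
    (h : PySem.List.min2? cs Prod.fst Prod.snd = some m) :
    m ∈ cs ∧ ∀ c ∈ cs, m.1 ≤ c.1 ∧ (m.1 = c.1 → m.2 ≤ c.2) := by
  induction cs using List.reverseRecOn generalizing m with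
  | nil => simp [PySem.List.min2?] at h
  | append_singleton cs e ih =>
      rw [min2?_append_one] at h
      cases hm : PySem.List.min2? cs Prod.fst Prod.snd with
      | none =>
          rw [hm] at h
          dsimp only at h
          have he : m = e := (Option.some.inj h).symm
          subst he
          have hcs : cs = [] := (min2?_none_iff cs).mp hm
          subst hcs
          refine ⟨by simp, ?_⟩
          intro c hc
          simp at hc
          subst hc
          exact ⟨le_refl _, fun _ => le_refl _⟩
      | some m' =>
          rw [hm] at h
          dsimp only at h
          obtain ⟨hmem, hmin⟩ := ih m' hm
          split_ifs at h with hcond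
          · have he : m = e := (Option.some.inj h).symm
            subst he
            refine ⟨by simp, ?_⟩
            intro c hc
            rcases List.mem_append.mp hc with h' | h'
            · obtain ⟨h1, h2⟩ := hmin c h'
              constructor
              · omega
              · intro heq
                rcases hcond with hlt | ⟨hle, hlt2⟩
                · omega
                · have := h2 (by omega)
                  omega
            · simp at h'; subst h'; exact ⟨le_refl _, fun _ => le_refl _⟩
          · have he : m = m' := (Option.some.inj h).symm
            subst he
            refine ⟨List.mem_append.mpr (Or.inl hmem), ?_⟩
            intro c hc
            rcases List.mem_append.mp hc with h' | h'
            · exact hmin c h'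
            · simp at h'; subst h'
              push Not at hcond
              obtain ⟨h1, h2⟩ := hcond
              exact ⟨by omega, fun heq => by omega⟩

-- Main invariant: A's fold over the list is the (index, distance) pair of the
-- lexicographic minimum of the candidate table (or (-1,-1) if there is none).
lemma pvMain (x y : Int) (l : List (List Int)) :
    List.foldl (pvStep x y l) ((-1 : Int), (-1 : Int)) l =
      (match PySem.List.min2? (pvCands x y l 0) Prod.fst Prod.snd with
       | some m => (m.2, m.1)
       | none => ((-1 : Int), (-1 : Int))) := by
  induction l using List.reverseRecOn with
  | nil => simp [pvCands_nil, PySem.List.min2?]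
  | append_singleton l p ih =>
      have hcongr :
          List.foldl (pvStep x y (l ++ [p])) ((-1 : Int), (-1 : Int)) l =
          List.foldl (pvStep x y l) ((-1 : Int), (-1 : Int)) l := by
        apply PySem.List.foldl_congr_mem
        intro acc i hi
        simp only [pvStep, PySem.List.index?_append_of_mem _ hi]
      rw [List.foldl_append, List.foldl_cons, List.foldl_nil, hcongr, ih,
          pvCands_append_one]
      by_cases hc : PySem.List.pyGetD p 0 0 = x ∨ PySem.List.pyGetD p 1 0 = y
      · simp only [hc, if_true]
        rw [min2?_append_one]
        cases hm : PySem.List.min2? (pvCands x y l 0) Prod.fst Prod.snd with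
        | none =>
            have hcs : pvCands x y l 0 = [] := (min2?_none_iff _).mp hm
            have hpl : p ∉ l := by
              intro hp
              obtain ⟨j, hj⟩ := pvCands_mem_of_mem x y l 0 p hp hc
              rw [hcs] at hj
              cases hj
            simp only [pvStep, hc, if_true]
            rw [PySem.List.index?_append_singleton_self l p hpl]
            simp
        | some m =>
            obtain ⟨hmem, hmin⟩ := min2?_some_spec _ _ hm
            obtain ⟨hm1, hm2, hm3⟩ := pvCands_bounds x y l 0 m hmem
            by_cases hlt :
                |PySem.List.pyGetD p 0 0 - x| + |PySem.List.pyGetD p 1 0 - y| < m.1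
            · -- new strict minimum: update fires, p cannot already occur in l
              have hpl : p ∉ l := by
                intro hp
                obtain ⟨j, hj⟩ := pvCands_mem_of_mem x y l 0 p hp hc
                have := (hmin _ hj).1
                simp at this
                omega
              simp only [pvStep, hc, if_true]
              rw [if_pos (Or.inr hlt)]
              rw [PySem.List.index?_append_singleton_self l p hpl]
              simp only [if_pos (Or.inl hlt)]
              simp
            · -- no update; the appended candidate also loses the lexicographic min
              have hcond : ¬ (|PySem.List.pyGetD p 0 0 - x| + |PySem.List.pyGetD p 1 0 - y| < m.1
                ∨ (|PySem.List.pyGetD p 0 0 - x| + |PySem.List.pyGetD p 1 0 - y| ≤ m.1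
                   ∧ (0 : Int) + l.length < m.2)) := by
                push Not
                exact ⟨by omega, fun _ => by omega⟩
              simp only [pvStep, hc, if_true]
              rw [if_neg (by push Not; exact ⟨by omega, by omega⟩)]
              rw [if_neg hcond]
      · simp only [hc, if_false, List.append_nil]
        cases hm : PySem.List.min2? (pvCands x y l 0) Prod.fst Prod.snd with
        | none => simp [pvStep, hc]
        | some m => simp [pvStep, hc]

-- the candidate table is the filtered, decorated enumeration
lemma pvCands_eq_filter_map (x y : Int) (l : List (List Int)) (s : Int) :
    pvCands x y l s =
      ((PySem.List.enumerate l s).filter (fun ip => pvOnAxis x y ip.2)).map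
        (fun ip => (pvDist x y ip.2, ip.1)) := by
  induction l generalizing s with
  | nil => rfl
  | cons q t ih =>
      rw [pvCands_cons, PySem.List.enumerate_cons, List.filter_cons, ih]
      by_cases hc : PySem.List.pyGetD q 0 0 = x ∨ PySem.List.pyGetD q 1 0 = y
      · simp [pvOnAxis, pvDist, hc]
      · simp [pvOnAxis, pvDist, hc]

lemma pvCands_nil_iff_any (x y : Int) (l : List (List Int)) (s : Int) :
    pvCands x y l s = [] ↔ l.any (pvOnAxis x y) = false := by
  rw [pvCands_eq_filter_map]
  simp only [List.map_eq_nil_iff, List.filter_eq_nil_iff, List.any_eq_false]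
  constructor
  · intro h p hp
    obtain ⟨k, hk, hpk⟩ := List.mem_iff_getElem.mp hp
    have : (s + k, p) ∈ PySem.List.enumerate l s := by
      rw [PySem.List.mem_enumerate_iff]
      exact ⟨k, hk, by rw [hpk]⟩
    simpa using h _ this
  · intro h ip hip
    obtain ⟨k, hk, hpk⟩ := (PySem.List.mem_enumerate_iff _ _ _).mp hip
    subst hpk
    simpa using h _ (List.getElem_mem hk)

lemma pvFilterSnd (x y : Int) (l : List (List Int)) (s : Int) :
    (((PySem.List.enumerate l s).filter (fun ip => pvOnAxis x y ip.2)).map Prod.snd)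
      = l.filter (pvOnAxis x y) := by
  induction l generalizing s with
  | nil => rfl
  | cons q t ih =>
      rw [PySem.List.enumerate_cons, List.filter_cons, List.filter_cons]
      by_cases hc : pvOnAxis x y q = true
      · simp [hc, ih (s + 1)]
      · simp [hc, ih (s + 1)]

-- find? over an index-increasing enumeration returns a hit no later than any given hit
lemma pvFind_first (q : Int × List Int → Bool) (l : List (List Int)) (s : Int)
    (ip0 : Int × List Int) (h0 : ip0 ∈ PySem.List.enumerate l s) (hq : q ip0 = true) :
    ∃ ipf, (PySem.List.enumerate l s).find? q = some ipf ∧ q ipf = true ∧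
      ipf.1 ≤ ip0.1 ∧ ipf ∈ PySem.List.enumerate l s := by
  induction l generalizing s with
  | nil => simp [PySem.List.enumerate_nil] at h0
  | cons a t ih =>
      rw [PySem.List.enumerate_cons] at h0 ⊢
      have hs0 : s ≤ ip0.1 := by
        rcases List.mem_cons.mp h0 with h | h
        · subst h; exact le_refl _
        · obtain ⟨k, hk, hpk⟩ := (PySem.List.mem_enumerate_iff _ _ _).mp h
          subst hpk; simp; omega
      by_cases hqa : q (s, a) = true
      · exact ⟨(s, a), by rw [List.find?_cons_of_pos hqa], hqa, hs0, List.mem_cons_self ..⟩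
      · have h0t : ip0 ∈ PySem.List.enumerate t (s + 1) := by
          rcases List.mem_cons.mp h0 with h | h
          · subst h; exact absurd hq hqa
          · exact h
        obtain ⟨ipf, hf, hqf, hle, hmem⟩ := ih (s + 1) h0t
        refine ⟨ipf, ?_, hqf, hle, List.mem_cons_of_mem _ hmem⟩
        rw [List.find?_cons_of_neg (by simpa using hqa), hf]

-- ===== VERDICT (by name: the statement is the Claim_ definition above) =====
theorem solution_1209_5_spec : Claim_equal_solution_1209_5 := by
  intro x y points _ _
  unfold Spec_solution_1209_5 solution_1209_5_alt
  rw [solution_1209_5_eq_foldl, pvMain]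
  cases hm : PySem.List.min2? (pvCands x y points 0) Prod.fst Prod.snd with
  | none =>
      have hnil : pvCands x y points 0 = [] := (min2?_none_iff _).mp hm
      have hany : points.any (pvOnAxis x y) = false := (pvCands_nil_iff_any x y points 0).mp hnil
      rw [if_pos hany]
  | some m =>
      obtain ⟨hmem, hmin⟩ := min2?_some_spec _ _ hm
      -- the loop's minimum is a member: an enumerate entry realises it
      rw [pvCands_eq_filter_map] at hmem
      obtain ⟨ip0, hip0, hip0e⟩ := List.mem_map.mp hmem
      obtain ⟨hip0mem, hip0ax⟩ := List.mem_filter.mp hip0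
      have hany : points.any (pvOnAxis x y) = true := by
        rcases (PySem.List.mem_enumerate_iff _ _ _).mp hip0mem with ⟨k, hk, hpk⟩
        exact List.any_eq_true.mpr ⟨points[k], List.getElem_mem hk, by rw [hpk] at hip0ax; exact hip0ax⟩
      rw [if_neg (by simp [hany])]
      -- the min() stage returns exactly m.1
      have hmapfst : (pvCands x y points 0).map Prod.fst
          = (points.filter (pvOnAxis x y)).map (pvDist x y) := by
        rw [pvCands_eq_filter_map, List.map_map, ← pvFilterSnd x y points 0, List.map_map]
        rfl
      have hm1mem : m.1 ∈ (points.filter (pvOnAxis x y)).map (pvDist x y) := by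
        rw [← hmapfst]
        exact List.mem_map.mpr ⟨m, by rw [pvCands_eq_filter_map]; exact hmem, rfl⟩
      cases hd : PySem.List.min? ((points.filter (pvOnAxis x y)).map (pvDist x y)) (fun v => v) with
      | none =>
          rw [PySem.List.min?_eq_none_iff] at hd
          rw [hd] at hm1mem
          cases hm1mem
      | some d =>
          have hdm : d = m.1 := by
            have h1 : d ≤ m.1 := PySem.List.min?_isMin hd _ hm1mem
            have hdmem : d ∈ (points.filter (pvOnAxis x y)).map (pvDist x y) :=
              PySem.List.min?_mem hd
            rw [← hmapfst] at hdmem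
            obtain ⟨c, hc, hce⟩ := List.mem_map.mp hdmem
            have h2 : m.1 ≤ d := by
              have := (hmin c hc).1
              omega
            omega
          -- the next() stage: the first hit has exactly the index m.2
          have hq0 : (fun ip => pvOnAxis x y ip.2 && (pvDist x y ip.2 == d)) ip0 = true := by
            have : pvDist x y ip0.2 = m.1 := congrArg Prod.fst hip0e
            simp [hip0ax, this, hdm]
          obtain ⟨ipf, hf, hqf, hle, hfmem⟩ := pvFind_first (fun ip => pvOnAxis x y ip.2 && (pvDist x y ip.2 == d)) points 0 ip0 hip0mem hq0
          dsimp only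
          rw [hf]
          dsimp only
          -- the found entry yields a candidate, so m.2 ≤ ipf.1
          simp only [Bool.and_eq_true, beq_iff_eq] at hqf
          have hcf : (pvDist x y ipf.2, ipf.1) ∈ pvCands x y points 0 := by
            rw [pvCands_eq_filter_map]
            exact List.mem_map.mpr ⟨ipf, List.mem_filter.mpr ⟨hfmem, hqf.1⟩, rfl⟩
          have hge : m.2 ≤ ipf.1 := by
            have h := hmin _ hcf
            exact h.2 (by simp [hqf.2, hdm])
          have hip01 : ip0.1 = m.2 := congrArg Prod.snd hip0e
          omega
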